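-- pv_equiv track=rewrite | github.com/Grace123456789x/nonogram-solver | src/nonogram/line_patterns.py | forced_cells
-- ===== SOURCE A (Python) =====
-- from typing import List
--
-- FILLED = "#"
--
-- EMPTY = "."
--
-- UNKNOWN = "?"
--
-- def forced_cells(patterns: List[str]) -> str:
--     """
--     Given remaining valid patterns for a line, return a string of forced cells:
--     - '#' if all patterns have '#'
--     - '.' if all patterns have '.'
--     - '?' otherwise
--     """
--     if not patterns:
--         raise ValueError("forced_cells called with empty pattern list")
--
--     n = len(patterns[0])
--     forced = []
--     for i in range(n):
--         col = {p[i] for p in patterns}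
--         if col == {FILLED}:
--             forced.append(FILLED)
--         elif col == {EMPTY}:
--             forced.append(EMPTY)
--         else:
--             forced.append(UNKNOWN)
--     return "".join(forced)
-- ===== SOURCE B (Python) =====
-- def forced_cells(patterns):
--     """
--     Given remaining valid patterns for a line, return a string of forced cells:
--     - '#' if all patterns have '#'
--     - '.' if all patterns have '.'
--     - '?' otherwise
--     """
--     if not patterns:
--         raise ValueError("forced_cells called with empty pattern list")
--     n = len(patterns[0])
--     result = [c if c in "#." else "?" for c in patterns[0]]
--     for p in patterns[1:]:
--         for i in range(n):
--             if p[i] != result[i]: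
--                 result[i] = "?"
--     return "".join(result)
-- ===== Notes on version B (the rewrite author's own statement) =====
-- stated objective: alternative
-- what changed: Instead of building a per-column set of characters for each index and comparing it with {'#'} / {'.'}, B keeps one mutable consensus row initialized from patterns[0] (mapping non-'#'/'.' chars to '?') and degrades a cell to '?' on any mismatch while sweeping the remaining patterns once.
import Mathlib
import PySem

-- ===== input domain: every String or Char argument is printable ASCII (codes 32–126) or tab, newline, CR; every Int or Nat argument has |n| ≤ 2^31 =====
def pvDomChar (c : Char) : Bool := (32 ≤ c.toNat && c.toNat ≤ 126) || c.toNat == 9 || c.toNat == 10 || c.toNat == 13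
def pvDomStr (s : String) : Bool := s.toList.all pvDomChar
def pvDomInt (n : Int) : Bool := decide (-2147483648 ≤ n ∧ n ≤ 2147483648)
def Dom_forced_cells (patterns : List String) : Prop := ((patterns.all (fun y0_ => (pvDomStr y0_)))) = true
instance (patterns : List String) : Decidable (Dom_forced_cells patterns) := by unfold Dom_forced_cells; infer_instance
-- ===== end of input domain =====

-- B replaces A's per-column character-set construction by a single-sweep consensus row
-- (init from patterns[0], any mismatch forces '?'): an alternative decomposition, same cost.


-- ===== PORT A =====
-- col = {p[i] for p in patterns}; the getD default is never read under Pre_ (every row has length ≥ n)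
def aCol (rows : List (List Char)) (i : Nat) : PySem.Set Char :=
  PySem.Set.ofList (rows.map (fun r => r.getD i '?'))

def forced_cells (patterns : List String) : String :=
  match patterns with
  | [] => ""   -- Python raises ValueError here; excluded by Pre_
  | p0 :: _ =>
    let rows := patterns.map String.toList
    let n := p0.toList.length
    let forced := (List.range n).foldl (fun acc i =>
      let col := aCol rows i
      if PySem.Set.equal col ['#'] then acc ++ ['#']
      else if PySem.Set.equal col ['.'] then acc ++ ['.']
      else acc ++ ['?']) []
    String.mk forced

-- ===== PORT B =====
def bInit (c : Char) : Char := if c = '#' then c else if c = '.' then c else '?'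

def bStep (res : List Char) (p : List Char) : List Char :=
  List.zipWith (fun r c => if c ≠ r then '?' else r) res p

def forced_cells_alt (patterns : List String) : String :=
  match patterns with
  | [] => ""   -- Python raises ValueError here; excluded by Pre_
  | p0 :: rest =>
    String.mk (rest.foldl (fun res p => bStep res p.toList) (p0.toList.map bInit))

-- ===== PRECONDITION & SPEC =====
-- Pre_ excludes exactly the inputs where A raises: the empty list (ValueError) and lists where
-- some pattern is shorter than patterns[0] (IndexError).
def Pre_forced_cells (patterns : List String) : Prop :=
  patterns ≠ [] ∧ ∀ p ∈ patterns, (patterns.headD "").toList.length ≤ p.toList.length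
instance (patterns : List String) : Decidable (Pre_forced_cells patterns) := by
  unfold Pre_forced_cells; infer_instance

def pvWitness_forced_cells : List String := ["#.#", "##."]

def Spec_forced_cells (patterns : List String) (out : String) : Prop := out = forced_cells_alt patterns
instance (patterns : List String) (out : String) : Decidable (Spec_forced_cells patterns out) := by unfold Spec_forced_cells; infer_instance

-- ===== CLAIM (what is proved, stated in full; the proofs are below) =====
def Claim_equal_forced_cells : Prop := ∀ (patterns : List String), Dom_forced_cells patterns → Pre_forced_cells patterns → Spec_forced_cells patterns (forced_cells patterns)

-- ===== LEMMAS AND PROOFS =====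

-- the common column classifier
def cls (cs : List Char) : Char :=
  if cs.all (· == '#') then '#' else if cs.all (· == '.') then '.' else '?'

-- the common normal form: column-wise classification of the first n positions
def colmap (rows : List (List Char)) (n : Nat) : List Char :=
  (List.range n).map (fun i => cls (rows.map (fun r => r.getD i '?')))

lemma set_equal_singleton {a : Char} {l : List Char} :
    PySem.Set.equal (PySem.Set.ofList l) [a] = true ↔ (l ≠ [] ∧ ∀ x ∈ l, x = a) := by
  simp only [PySem.Set.equal, PySem.Set.issubset, Bool.and_eq_true, List.all_eq_true]
  constructor
  · rintro ⟨h1, h2⟩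
    have ha : a ∈ PySem.Set.ofList l := by
      have := h2 a (by simp)
      simpa [PySem.Set.contains] using this
    rw [PySem.Set.mem_ofList] at ha
    refine ⟨by rintro rfl; simp at ha, fun x hx => ?_⟩
    have := h1 x (by rw [PySem.Set.mem_ofList]; exact hx)
    simpa [PySem.Set.contains] using this
  · rintro ⟨hne, hall⟩
    constructor
    · intro x hx
      rw [PySem.Set.mem_ofList] at hx
      simp [PySem.Set.contains, hall x hx]
    · intro x hx
      simp only [List.mem_singleton] at hx
      obtain ⟨y, hy⟩ := List.exists_mem_of_ne_nil l hne
      have hal : a ∈ l := by rw [← hall y hy]; exact hy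
      simp [PySem.Set.contains, List.contains_eq_mem, hx, (PySem.Set.mem_ofList l a).2 hal]

lemma aCls_eq_cls (cs : List Char) (h : cs ≠ []) :
    (if PySem.Set.equal (PySem.Set.ofList cs) ['#'] then '#'
     else if PySem.Set.equal (PySem.Set.ofList cs) ['.'] then '.' else '?') = cls cs := by
  unfold cls
  by_cases h1 : cs.all (· == '#')
  · have : PySem.Set.equal (PySem.Set.ofList cs) ['#'] = true :=
      set_equal_singleton.2 ⟨h, by simpa [List.all_eq_true] using h1⟩
    simp [this, h1]
  · have e1 : ¬ PySem.Set.equal (PySem.Set.ofList cs) ['#'] = true := by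
      intro hc; exact h1 (by simpa [List.all_eq_true] using (set_equal_singleton.1 hc).2)
    by_cases h2 : cs.all (· == '.')
    · have : PySem.Set.equal (PySem.Set.ofList cs) ['.'] = true :=
        set_equal_singleton.2 ⟨h, by simpa [List.all_eq_true] using h2⟩
      simp [e1, this, h1, h2]
    · have e2 : ¬ PySem.Set.equal (PySem.Set.ofList cs) ['.'] = true := by
        intro hc; exact h2 (by simpa [List.all_eq_true] using (set_equal_singleton.1 hc).2)
      simp [e1, e2, h1, h2]

-- appending one character to a nonempty column updates cls exactly as B's mismatch rule does
lemma cls_snoc (cs : List Char) (h : cs ≠ []) (c : Char) :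
    cls (cs ++ [c]) = if c ≠ cls cs then '?' else cls cs := by
  obtain ⟨y, hy⟩ := List.exists_mem_of_ne_nil cs h
  unfold cls
  by_cases h1 : cs.all (· == '#')
  · have hy1 : y = '#' := by simpa using (List.all_eq_true.1 h1) y hy
    have h2 : ¬ cs.all (· == '.') := by
      intro hc; have : y = '.' := by simpa using (List.all_eq_true.1 hc) y hy
      simp [hy1] at this
    by_cases hc : c = '#'
    · simp [h1, hc, List.all_append]
    · have : ¬ (cs ++ [c]).all (· == '.') := by
        simp only [List.all_append, Bool.and_eq_true]; rintro ⟨hca, -⟩; exact h2 hca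
      simp only [List.all_append, h1, Bool.true_and] at *
      simp [hc, h2]
  · by_cases h2 : cs.all (· == '.')
    · have hy1 : y = '.' := by simpa using (List.all_eq_true.1 h2) y hy
      have hne1 : ¬ (cs ++ [c]).all (· == '#') := by
        simp only [List.all_append, Bool.and_eq_true]; rintro ⟨hca, -⟩; exact h1 hca
      by_cases hc : c = '.'
      · simp [h1, h2, hc, List.all_append]
      · simp [h1, h2, hc, hne1]
    · have hne1 : ¬ (cs ++ [c]).all (· == '#') := by
        simp only [List.all_append, Bool.and_eq_true]; rintro ⟨hca, -⟩; exact h1 hca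
      have hne2 : ¬ (cs ++ [c]).all (· == '.') := by
        simp only [List.all_append, Bool.and_eq_true]; rintro ⟨hca, -⟩; exact h2 hca
      simp [h1, h2, hne1, hne2]

-- one bStep on the normal form appends the new row to every column
lemma bStep_colmap (rows : List (List Char)) (hrows : rows ≠ []) (n : Nat)
    (r : List Char) (hr : n ≤ r.length) :
    bStep (colmap rows n) r = colmap (rows ++ [r]) n := by
  apply List.ext_getElem
  · simp [bStep, colmap, Nat.min_def]; omega
  · intro i h1 h2
    have hlen1 : i < n ∧ i < r.length := by simpa [bStep, colmap] using h1
    have hordsn : rows.map (fun row => row.getD i '?') ≠ [] := by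
      simpa using hrows
    simp only [bStep, colmap, List.getElem_zipWith, List.getElem_map, List.getElem_range,
      List.map_append, List.map_cons, List.map_nil]
    rw [cls_snoc _ hordsn, List.getD_eq_getElem r '?' hlen1.2]

-- B's initialization is the normal form of the single row patterns[0]
lemma init_colmap (r0 : List Char) : r0.map bInit = colmap [r0] r0.length := by
  apply List.ext_getElem
  · simp [colmap]
  · intro i h1 h2
    have hin : i < r0.length := by simpa using h1
    simp only [colmap, List.getElem_map, List.getElem_range, List.map_cons, List.map_nil]
    rw [List.getD_eq_getElem r0 '?' hin]
    simp only [bInit, cls, List.all_cons, List.all_nil, Bool.and_true]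
    by_cases hc : r0[i] = '#' <;> by_cases hd : r0[i] = '.' <;> simp [hc, hd]

-- B's fold maintains the normal form over all processed rows
lemma foldl_bStep (rest : List (List Char)) (rows0 : List (List Char)) (h0 : rows0 ≠ [])
    (n : Nat) (hlen : ∀ r ∈ rest, n ≤ r.length) :
    rest.foldl (fun res p => bStep res p) (colmap rows0 n) = colmap (rows0 ++ rest) n := by
  induction rest generalizing rows0 with
  | nil => simp
  | cons r rest ih =>
    simp only [List.foldl_cons]
    rw [bStep_colmap rows0 h0 n r (hlen r (by simp))]
    rw [ih (rows0 ++ [r]) (by simp) (fun x hx => hlen x (by simp [hx]))]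
    simp

-- A's loop produces the same normal form
lemma forced_eq_colmap (rows : List (List Char)) (hrows : rows ≠ []) (n : Nat) :
    (List.range n).foldl (fun acc i =>
      let col := aCol rows i
      if PySem.Set.equal col ['#'] then acc ++ ['#']
      else if PySem.Set.equal col ['.'] then acc ++ ['.']
      else acc ++ ['?']) [] = colmap rows n := by
  have step : ∀ (acc : List Char) (i : Nat),
      (let col := aCol rows i
       if PySem.Set.equal col ['#'] then acc ++ ['#']
       else if PySem.Set.equal col ['.'] then acc ++ ['.']
       else acc ++ ['?'])
      = acc ++ [cls (rows.map (fun r => r.getD i '?'))] := by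
    intro acc i
    have hne : rows.map (fun r => r.getD i '?') ≠ [] := by simpa using hrows
    have hcl := aCls_eq_cls (rows.map (fun r => r.getD i '?')) hne
    simp only [aCol]
    by_cases hA : PySem.Set.equal (PySem.Set.ofList (rows.map (fun r => r.getD i '?'))) ['#'] = true
    · simp only [hA, if_true] at hcl ⊢
      rw [hcl]
    · by_cases hB : PySem.Set.equal (PySem.Set.ofList (rows.map (fun r => r.getD i '?'))) ['.'] = true
      · simp only [hA, hB, if_true, if_false, Bool.false_eq_true] at hcl ⊢
        rw [hcl]
      · simp only [hA, hB, if_false, Bool.false_eq_true] at hcl ⊢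
        rw [← hcl]
  calc (List.range n).foldl (fun acc i =>
        let col := aCol rows i
        if PySem.Set.equal col ['#'] then acc ++ ['#']
        else if PySem.Set.equal col ['.'] then acc ++ ['.']
        else acc ++ ['?']) []
      = (List.range n).foldl (fun acc i => acc ++ [cls (rows.map (fun r => r.getD i '?'))]) [] := by
        apply PySem.List.foldl_congr_mem
        intro acc x _; exact step acc x
    _ = colmap rows n := by
        rw [PySem.List.foldl_append_singleton_eq_map]
        simp [colmap]

-- ===== VERDICT (by name: the statement is the Claim_ definition above) =====
theorem forced_cells_spec : Claim_equal_forced_cells := by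
  intro patterns _hdom hpre
  obtain ⟨hne, hlen⟩ := hpre
  unfold Spec_forced_cells forced_cells forced_cells_alt
  match patterns, hne with
  | p0 :: rest, _ =>
    simp only
    congr 1
    have hrows : (p0 :: rest).map String.toList ≠ [] := by simp
    rw [forced_eq_colmap _ hrows]
    rw [init_colmap p0.toList]
    have hlen' : ∀ r ∈ rest.map String.toList, p0.toList.length ≤ r.length := by
      intro r hr
      simp only [List.mem_map] at hr
      obtain ⟨s, hs, rfl⟩ := hr
      simpa using hlen s (by simp [hs])
    have := foldl_bStep (rest.map String.toList) [p0.toList] (by simp) p0.toList.length hlen'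
    rw [List.foldl_map] at this
    rw [this]
    simp
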